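-- pv_equiv track=rewrite | github.com/JoohyungDev/algorithm | 프로그래머스/lv0/무작위로 K개의 수 뽑기.py | solution
-- ===== SOURCE A (Python) =====
-- def solution(arr, k):
--     result = []
--     # 일정한 범위에서 무작위로 수를 뽑기
--     # 지금까지 나온적 없는 수이면 배열 맨뒤에 추가
--     # 어떤 수가 무작위로 주어질지 알고 있다
--     # 무작위의 수는 arr에 저장된 순서대로 주어질 예정
--     # 완성 배열의 길이 < k 나머지 값을 전부 -1로 채워 return
--     arr = list(dict.fromkeys(arr))
--     result = arr
--
--     if len(arr) < k:
--         for i in range(k-len(arr)):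
--             result.append(-1)
--     elif len(arr) > k:
--         for i in range(len(arr)-k):
--             del result[-1]
--
--     return result
-- ===== SOURCE B (Python) =====
-- def solution(arr, k):
--     result = []
--     seen = set()
--     for x in arr:
--         if len(result) == k:
--             break
--         if x not in seen:
--             seen.add(x)
--             result.append(x)
--     result.extend([-1] * (k - len(result)))
--     return result
-- ===== Notes on version B (the rewrite author's own statement) =====
-- stated objective: alternative
-- what changed: Replaces A's staged pipeline (dedup the whole list with dict.fromkeys, then a three-case if/elif length fix-up with append/delete loops) by one streaming pass over arr with a seen-set that breaks early once k distinct values are collected, followed by a single pad.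
import Mathlib
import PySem

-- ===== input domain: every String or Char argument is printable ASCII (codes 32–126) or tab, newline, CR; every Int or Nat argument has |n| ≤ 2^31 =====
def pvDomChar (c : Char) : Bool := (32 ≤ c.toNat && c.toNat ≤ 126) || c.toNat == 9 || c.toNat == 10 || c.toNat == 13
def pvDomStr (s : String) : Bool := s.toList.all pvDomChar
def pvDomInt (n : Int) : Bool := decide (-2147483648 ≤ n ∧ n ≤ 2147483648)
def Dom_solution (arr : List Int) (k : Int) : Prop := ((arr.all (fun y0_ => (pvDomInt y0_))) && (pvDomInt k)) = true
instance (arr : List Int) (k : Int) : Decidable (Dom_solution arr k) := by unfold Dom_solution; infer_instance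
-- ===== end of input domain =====

-- B replaces A's staged whole-list dedup (dict.fromkeys) followed by a three-case length
-- adjustment with ONE streaming pass: a seen-set with an early break once k values are
-- collected, then a single pad (objective: alternative decomposition, same cost).

-- ===== PORT A =====
def solution (arr : List Int) (k : Int) : List Int :=
  -- arr = list(dict.fromkeys(arr)); result = arr
  let arr' := PySem.List.dedup arr
  let result := arr'
  if (PySem.List.len arr') < k then
    -- for i in range(k-len(arr)): result.append(-1)
    (PySem.List.pyRange 0 (k - PySem.List.len arr') 1).foldl (fun r _ => r ++ [(-1 : Int)]) result
  else if (PySem.List.len arr') > k then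
    -- for i in range(len(arr)-k): del result[-1]   (del result[-1] drops the last element;
    -- on an empty result Python raises IndexError — those inputs are outside Pre_solution)
    (PySem.List.pyRange 0 (PySem.List.len arr' - k) 1).foldl (fun r _ => r.dropLast) result
  else
    result

-- ===== PORT B =====
-- for x in arr: break once len(result)==k; append x if unseen, tracking a seen-set
def solLoop (k : Int) (xs : List Int) (out : List Int) (seen : PySem.Set Int) : List Int :=
  match xs with
  | [] => out
  | x :: rest =>
      if (out.length : Int) = k then out
      else if PySem.Set.contains seen x then solLoop k rest out seen
      else solLoop k rest (out ++ [x]) (PySem.Set.add seen x)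

def solution_alt (arr : List Int) (k : Int) : List Int :=
  let out := solLoop k arr [] PySem.Set.empty
  -- result.extend([-1] * (k - len(result)))
  out ++ List.replicate (k - (out.length : Int)).toNat (-1 : Int)

-- ===== PRECONDITION & SPEC =====
-- Pre_ excludes exactly k < 0: there A's delete loop runs len(dedup)-k > len(dedup) times and
-- raises IndexError (no input on which A returns is excluded).
def Pre_solution (arr : List Int) (k : Int) : Prop := 0 ≤ k
instance (arr : List Int) (k : Int) : Decidable (Pre_solution arr k) := by unfold Pre_solution; infer_instance

def pvWitness_solution : List Int × Int := ([1, 2, 2, 3], 2)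

def Spec_solution (arr : List Int) (k : Int) (out : List Int) : Prop := out = solution_alt arr k
instance (arr : List Int) (k : Int) (out : List Int) : Decidable (Spec_solution arr k out) := by unfold Spec_solution; infer_instance

-- ===== CLAIM (what is proved, stated in full; the proofs are below) =====
def Claim_equal_solution : Prop := ∀ (arr : List Int) (k : Int), Dom_solution arr k → Pre_solution arr k → Spec_solution arr k (solution arr k)

-- ===== LEMMAS AND PROOFS =====

-- Proof-side: the elements of xs not yet in `seen`, first occurrences in order.
def dexcl (seen : PySem.Set Int) : List Int → List Int
  | [] => []
  | x :: xs => if PySem.Set.contains seen x then dexcl seen xs else x :: dexcl (PySem.Set.add seen x) xs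

-- seen.update(xs) appends exactly the fresh elements.
theorem update_eq_append_dexcl (xs : List Int) (seen : PySem.Set Int) :
    PySem.Set.update seen xs = seen ++ dexcl seen xs := by
  induction xs generalizing seen with
  | nil => simp [PySem.Set.update_nil, dexcl]
  | cons x xs ih =>
      rw [PySem.Set.update_cons]
      by_cases h : PySem.Set.contains seen x
      · have hx : x ∈ seen := (PySem.Set.contains_iff seen x).mp h
        rw [PySem.Set.add_of_mem hx, ih, dexcl, if_pos h]
      · have hx : x ∉ seen := fun hm => h ((PySem.Set.contains_iff seen x).mpr hm)
        rw [ih, dexcl, if_neg h, PySem.Set.add_of_not_mem hx]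
        simp

-- B's loop collects up to k fresh elements: closed form.
theorem solLoop_eq (k : Int) (hk : 0 ≤ k) (xs : List Int) :
    ∀ (out : List Int) (seen : PySem.Set Int), out.length ≤ k.toNat →
    solLoop k xs out seen = out ++ (dexcl seen xs).take (k.toNat - out.length) := by
  induction xs with
  | nil => intro out seen _; simp [solLoop, dexcl]
  | cons x rest ih =>
      intro out seen hle
      rw [solLoop]
      by_cases hstop : (out.length : Int) = k
      · have : k.toNat - out.length = 0 := by omega
        simp [hstop, this]
      · have hlt : out.length < k.toNat := by omega
        rw [if_neg hstop]
        by_cases hseen : PySem.Set.contains seen x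
        · rw [if_pos hseen, ih out seen hle, dexcl, if_pos hseen]
        · rw [if_neg hseen, ih (out ++ [x]) (PySem.Set.add seen x) (by simp; omega),
              dexcl, if_neg hseen]
          obtain ⟨n, hn⟩ : ∃ n, k.toNat - out.length = n + 1 := ⟨k.toNat - out.length - 1, by omega⟩
          rw [hn, List.take_succ_cons]
          have : k.toNat - (out ++ [x]).length = n := by simp; omega
          rw [this]
          simp

-- A's append loop appends one -1 per loop iteration.
theorem foldl_append_neg_one (l : List Int) (init : List Int) :
    l.foldl (fun r _ => r ++ [(-1 : Int)]) init = init ++ List.replicate l.length (-1) := by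
  induction l generalizing init with
  | nil => simp
  | cons x xs ih =>
      simp [List.foldl_cons, ih, List.replicate_succ]

-- A's delete loop removes one trailing element per loop iteration.
theorem foldl_dropLast (l : List Int) (init : List Int) :
    l.foldl (fun (r : List Int) _ => r.dropLast) init = init.take (init.length - l.length) := by
  induction l generalizing init with
  | nil => simp
  | cons x xs ih =>
      rw [List.foldl_cons, ih]
      simp only [List.dropLast_eq_take, List.take_take, List.length_take, List.length_cons]
      congr 1
      omega

-- Both programs equal take-k-then-pad of the ordered dedup.
theorem solution_closed (arr : List Int) (k : Int) (hk : 0 ≤ k) :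
    solution arr k = (PySem.List.dedup arr).take k.toNat
      ++ List.replicate (k.toNat - (PySem.List.dedup arr).length) (-1 : Int) := by
  unfold solution
  simp only [PySem.List.len]
  set d := PySem.List.dedup arr with hd
  by_cases h1 : (d.length : Int) < k
  · rw [if_pos h1, foldl_append_neg_one, PySem.List.length_pyRange_one,
        List.take_of_length_le (by omega)]
    have h3 : (k - (d.length : Int) - 0).toNat = k.toNat - d.length := by omega
    rw [h3]
  · rw [if_neg h1]
    by_cases h2 : (d.length : Int) > k
    · rw [if_pos h2, foldl_dropLast, PySem.List.length_pyRange_one]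
      have h3 : k.toNat - d.length = 0 := by omega
      rw [h3, List.replicate_zero, List.append_nil]
      congr 1
      omega
    · rw [if_neg h2, List.take_of_length_le (by omega)]
      have h3 : k.toNat - d.length = 0 := by omega
      simp [h3]

theorem solution_alt_closed (arr : List Int) (k : Int) (hk : 0 ≤ k) :
    solution_alt arr k = (PySem.List.dedup arr).take k.toNat
      ++ List.replicate (k.toNat - (PySem.List.dedup arr).length) (-1 : Int) := by
  unfold solution_alt
  have hdex : PySem.List.dedup arr = dexcl PySem.Set.empty arr := by
    rw [PySem.List.dedup_eq_ofList, ← PySem.Set.update_nil_left arr,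
        update_eq_append_dexcl]
    rfl
  rw [show solLoop k arr [] PySem.Set.empty
        = [] ++ (dexcl PySem.Set.empty arr).take (k.toNat - ([] : List Int).length)
      from solLoop_eq k hk arr [] PySem.Set.empty (by simp)]
  rw [← hdex]
  simp only [List.nil_append, List.length_nil, Nat.sub_zero]
  congr 1
  rw [List.length_take]
  congr 1
  omega

theorem solution_spec : Claim_equal_solution := by
  intro arr k _ hk
  unfold Spec_solution
  rw [solution_closed arr k hk, solution_alt_closed arr k hk]
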